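-- pv_equiv track=rewrite | github.com/cirosantilli/project-euler-solutions | solvers/915.py | cycle_info_s_mod
-- ===== SOURCE A (Python) =====
-- def f_mod(x: int, m: int) -> int:
--     """f(x) = (x-1)^3 + 2 (mod m)."""
--     y = (x - 1) % m
--     y2 = (y * y) % m
--     y3 = (y2 * y) % m
--     return (y3 + 2) % m
--
-- def cycle_info_s_mod(m: int) -> tuple[int, int]:
--     """Floyd cycle detection for s(n) modulo m.
--
--     We consider the state sequence:
--       x_0 = s(0) = 0
--       x_{n+1} = f(x_n) (mod m)
--     so x_n == s(n) (mod m).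
--
--     Returns (mu, lam) where the sequence becomes periodic:
--       x_n = x_{mu + (n-mu) % lam} for all n >= mu.
--     """
--
--     def step(z: int) -> int:
--         return f_mod(z, m)
--
--     x0 = 0
--     tortoise = step(x0)
--     hare = step(step(x0))
--     while tortoise != hare:
--         tortoise = step(tortoise)
--         hare = step(step(hare))
--
--     mu = 0
--     tortoise = x0
--     while tortoise != hare:
--         tortoise = step(tortoise)
--         hare = step(hare)
--         mu += 1
--
--     lam = 1
--     hare = step(tortoise)
--     while tortoise != hare:
--         hare = step(hare)
--         lam += 1
--
--     return mu, lam
-- ===== SOURCE B (Python) =====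
-- def f_mod(x: int, m: int) -> int:
--     """f(x) = (x-1)^3 + 2 (mod m)."""
--     y = (x - 1) % m
--     y2 = (y * y) % m
--     y3 = (y2 * y) % m
--     return (y3 + 2) % m
--
-- def cycle_info_s_mod(m: int) -> tuple[int, int]:
--     """Single forward walk with a first-seen-index table instead of Floyd's
--     three two-pointer phases: the first state that reappears closes the cycle,
--     its first-seen index is mu and the gap is lam."""
--     seen = {0: 0}
--     x = 0
--     n = 0
--     while True:
--         x = f_mod(x, m)
--         n += 1
--         if x in seen:
--             i = seen[x]
--             return i, n - i
--         seen[x] = n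
-- ===== Notes on version B (the rewrite author's own statement) =====
-- stated objective: faster
-- what changed: Replaces Floyd's three-phase tortoise/hare scan with a single forward walk that records each state's first-seen index in a dict and returns (first index of the repeated state, gap) at the first repeat; one f-evaluation per step instead of Floyd's ~5.
-- outside the precondition, e.g. on cycle_info_s_mod(0): A raises ZeroDivisionError, B raises ZeroDivisionError
import Mathlib
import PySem

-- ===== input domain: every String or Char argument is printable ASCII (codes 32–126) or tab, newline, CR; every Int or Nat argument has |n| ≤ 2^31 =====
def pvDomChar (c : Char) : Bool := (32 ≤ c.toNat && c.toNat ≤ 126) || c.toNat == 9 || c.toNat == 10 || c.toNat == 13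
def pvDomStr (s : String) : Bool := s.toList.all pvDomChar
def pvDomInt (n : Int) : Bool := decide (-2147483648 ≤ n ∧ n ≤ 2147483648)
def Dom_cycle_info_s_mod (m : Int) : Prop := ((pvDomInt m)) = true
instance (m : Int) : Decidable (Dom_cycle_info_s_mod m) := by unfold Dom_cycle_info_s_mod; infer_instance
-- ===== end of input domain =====

-- B replaces Floyd's three-phase tortoise/hare scan with one forward walk plus a
-- first-seen-index dict (same asymptotic cost, fewer f-evaluations per step).

-- ===== PORT A =====
def f_mod (x m : Int) : Int :=
  let y := PySem.Int.mod (x - 1) m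
  let y2 := PySem.Int.mod (y * y) m
  let y3 := PySem.Int.mod (y2 * y) m
  PySem.Int.mod (y3 + 2) m

-- the three while-loops of A, each with a fuel totality guard (proved sufficient under Pre_)
def pvLoop1 (m : Int) : Nat → Int → Int → Int
  | 0, _, h => h
  | fuel+1, t, h => if t = h then h else pvLoop1 m fuel (f_mod t m) (f_mod (f_mod h m) m)

def pvLoop2 (m : Int) : Nat → Int → Int → Int → Int × Int
  | 0, t, _, mu => (mu, t)
  | fuel+1, t, h, mu => if t = h then (mu, t) else pvLoop2 m fuel (f_mod t m) (f_mod h m) (mu + 1)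

def pvLoop3 (m : Int) : Nat → Int → Int → Int → Int
  | 0, _, _, lam => lam
  | fuel+1, t, h, lam => if t = h then lam else pvLoop3 m fuel t (f_mod h m) (lam + 1)

def cycle_info_s_mod (m : Int) : Int × Int :=
  let fuel := m.natAbs + 1
  let x0 : Int := 0
  let h1 := pvLoop1 m fuel (f_mod x0 m) (f_mod (f_mod x0 m) m)
  let p := pvLoop2 m fuel x0 h1 0
  let lam := pvLoop3 m fuel p.2 (f_mod p.2 m) 1
  (p.1, lam)

-- ===== PORT B =====
-- the while-True loop of Source B, with a fuel totality guard (proved sufficient under Pre_)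
def pvAltLoop (m : Int) : Nat → Int → Int → PySem.Dict Int Int → Int × Int
  | 0, _, _, _ => (0, 0)
  | fuel+1, x, n, seen =>
    let x' := f_mod x m
    let n' := n + 1
    match PySem.Dict.get? seen x' with
    | some i => (i, n' - i)
    | none => pvAltLoop m fuel x' n' (PySem.Dict.insert seen x' n')

def cycle_info_s_mod_alt (m : Int) : Int × Int :=
  pvAltLoop m (m.natAbs + 1) 0 0 (PySem.Dict.insert PySem.Dict.empty 0 0)

-- ===== PRECONDITION & SPEC =====
-- at m = 0 both Pythons raise ZeroDivisionError in f_mod, so m = 0 is excluded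
def Pre_cycle_info_s_mod (m : Int) : Prop := m ≠ 0
instance (m : Int) : Decidable (Pre_cycle_info_s_mod m) := by unfold Pre_cycle_info_s_mod; infer_instance
def pvWitness_cycle_info_s_mod : Int := 10

def Spec_cycle_info_s_mod (m : Int) (out : Int × Int) : Prop := out = cycle_info_s_mod_alt m
instance (m : Int) (out : Int × Int) : Decidable (Spec_cycle_info_s_mod m out) := by unfold Spec_cycle_info_s_mod; infer_instance

-- ===== CLAIM (what is proved, stated in full; the proofs are below) =====
def Claim_equal_cycle_info_s_mod : Prop := ∀ (m : Int), Dom_cycle_info_s_mod m → Pre_cycle_info_s_mod m → Spec_cycle_info_s_mod m (cycle_info_s_mod m)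

-- ===== LEMMAS AND PROOFS =====

-- the state sequence x_n (x_0 = 0, x_{n+1} = f_mod(x_n, m))
def pvX (m : Int) : Nat → Int
  | 0 => 0
  | n+1 => f_mod (pvX m n) m

-- the finite set of possible states (range of Python's % m)
noncomputable def pvS (m : Int) : Finset Int := if 0 < m then Finset.Ico 0 m else Finset.Ioc m 0

-- "index n is a repeat of an earlier index"
def pvP (m : Int) (n : Nat) : Prop := ∃ i, i < n ∧ pvX m i = pvX m n

-- N = first repeat index, mu = its earlier partner, L = the period
noncomputable def pvN (m : Int) : Nat := sInf {n | pvP m n}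
noncomputable def pvMu (m : Int) : Nat := sInf {i | i < pvN m ∧ pvX m i = pvX m (pvN m)}
noncomputable def pvL (m : Int) : Nat := pvN m - pvMu m

lemma pvS_card (m : Int) (hm : m ≠ 0) : (pvS m).card = m.natAbs := by
  unfold pvS
  split_ifs with h
  · rw [Int.card_Ico]; omega
  · rw [Int.card_Ioc]; omega

lemma pvMod_mem (m a : Int) (hm : m ≠ 0) : PySem.Int.mod a m ∈ pvS m := by
  unfold pvS
  split_ifs with h
  · rw [Finset.mem_Ico]
    exact ⟨PySem.Int.mod_nonneg a h, PySem.Int.mod_lt a h⟩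
  · rw [Finset.mem_Ioc]
    have hneg : m < 0 := by omega
    have := PySem.Int.mod_neg_bounds a hneg
    exact ⟨this.1, this.2⟩

lemma pvX_mem (m : Int) (hm : m ≠ 0) (n : Nat) : pvX m n ∈ pvS m := by
  cases n with
  | zero =>
    simp only [pvX, pvS]
    split_ifs with h
    · rw [Finset.mem_Ico]; omega
    · rw [Finset.mem_Ioc]; omega
  | succ k =>
    simp only [pvX, f_mod]
    exact pvMod_mem m _ hm

lemma pvPigeon (m : Int) (hm : m ≠ 0) :
    ∃ a b, a < b ∧ b ≤ m.natAbs ∧ pvX m a = pvX m b := by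
  have hcard : (pvS m).card < (Finset.range (m.natAbs + 1)).card := by
    rw [pvS_card m hm, Finset.card_range]; omega
  have hmaps : ∀ n ∈ Finset.range (m.natAbs + 1), pvX m n ∈ pvS m :=
    fun n _ => pvX_mem m hm n
  obtain ⟨a, ha, b, hb, hab, heq⟩ :=
    Finset.exists_ne_map_eq_of_card_lt_of_maps_to hcard hmaps
  rw [Finset.mem_range] at ha hb
  rcases Nat.lt_or_ge a b with h | h
  · exact ⟨a, b, h, by omega, heq⟩
  · have : b < a := by omega
    exact ⟨b, a, this, by omega, heq.symm⟩

lemma pvP_ex (m : Int) (hm : m ≠ 0) : ∃ n, pvP m n := by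
  obtain ⟨a, b, hab, _, heq⟩ := pvPigeon m hm
  exact ⟨b, a, hab, heq⟩

lemma pvN_spec (m : Int) (hm : m ≠ 0) : pvP m (pvN m) :=
  Nat.sInf_mem (pvP_ex m hm)

lemma pvN_min (m : Int) (n : Nat) (h : n < pvN m) : ¬ pvP m n := by
  intro hp
  have h2 : pvN m ≤ n := Nat.sInf_le hp
  omega

lemma pvN_le (m : Int) (hm : m ≠ 0) : pvN m ≤ m.natAbs := by
  obtain ⟨a, b, hab, hb, heq⟩ := pvPigeon m hm
  exact le_trans (Nat.sInf_le ⟨a, hab, heq⟩) hb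

-- injectivity of x on [0, N)
lemma pvInj (m : Int) (a b : Nat) (ha : a < pvN m) (hb : b < pvN m)
    (h : pvX m a = pvX m b) : a = b := by
  rcases lt_trichotomy a b with hl | he | hg
  · exact absurd ⟨a, hl, h⟩ (pvN_min m b hb)
  · exact he
  · exact absurd ⟨b, hg, h.symm⟩ (pvN_min m a ha)

lemma pvMu_mem (m : Int) (hm : m ≠ 0) :
    pvMu m < pvN m ∧ pvX m (pvMu m) = pvX m (pvN m) :=
  Nat.sInf_mem (pvN_spec m hm)

lemma pvMu_lt (m : Int) (hm : m ≠ 0) : pvMu m < pvN m := (pvMu_mem m hm).1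

lemma pvL_pos (m : Int) (hm : m ≠ 0) : 1 ≤ pvL m := by
  have := pvMu_lt m hm; unfold pvL; omega

lemma pvMuL (m : Int) (hm : m ≠ 0) : pvMu m + pvL m = pvN m := by
  have := pvMu_lt m hm; unfold pvL; omega

-- mu is the unique earlier partner of the first repeat
lemma pvMu_unique (m : Int) (hm : m ≠ 0) (i : Nat) (hi : i < pvN m)
    (h : pvX m i = pvX m (pvN m)) : i = pvMu m := by
  have hmu := pvMu_mem m hm
  exact pvInj m i (pvMu m) hi hmu.1 (h.trans hmu.2.symm)

lemma pvPeriod (m : Int) (hm : m ≠ 0) :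
    ∀ n, pvMu m ≤ n → pvX m (n + pvL m) = pvX m n := by
  intro n hn
  induction n with
  | zero =>
    have h0 : pvMu m = 0 := by omega
    have h2 := (pvMu_mem m hm).2
    have h3 : pvN m = 0 + pvL m := by have := pvMuL m hm; omega
    rw [h0, h3] at h2
    exact h2.symm
  | succ k ih =>
    rcases Nat.lt_or_ge k (pvMu m) with hk | hk
    · have hme : pvMu m = k + 1 := by omega
      have h2 := (pvMu_mem m hm).2
      have h3 : pvN m = pvMu m + pvL m := (pvMuL m hm).symm
      rw [h3, hme] at h2
      exact h2.symm
    · have harith : k + 1 + pvL m = (k + pvL m) + 1 := by omega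
      rw [harith]
      show f_mod (pvX m (k + pvL m)) m = f_mod (pvX m k) m
      rw [ih hk]

lemma pvPeriodK (m : Int) (hm : m ≠ 0) :
    ∀ k n, pvMu m ≤ n → pvX m (n + k * pvL m) = pvX m n := by
  intro k
  induction k with
  | zero => simp
  | succ j ih =>
    intro n hn
    have : n + (j + 1) * pvL m = (n + j * pvL m) + pvL m := by ring
    rw [this, pvPeriod m hm _ (by omega), ih n hn]

-- canonical representative of an index
noncomputable def pvR (m : Int) (n : Nat) : Nat :=
  if n < pvN m then n else pvMu m + (n - pvMu m) % pvL m

lemma pvR_lt (m : Int) (hm : m ≠ 0) (n : Nat) : pvR m n < pvN m := by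
  unfold pvR
  split_ifs with h
  · exact h
  · have h1 := pvL_pos m hm
    have h2 := pvMuL m hm
    have := Nat.mod_lt (n - pvMu m) (show 0 < pvL m by omega)
    omega

lemma pvR_of_ge (m : Int) (hm : m ≠ 0) (n : Nat) (h : pvMu m ≤ n) :
    pvR m n = pvMu m + (n - pvMu m) % pvL m := by
  unfold pvR
  split_ifs with hlt
  · have h2 := pvMuL m hm
    have : n - pvMu m < pvL m := by omega
    rw [Nat.mod_eq_of_lt this]; omega
  · rfl

lemma pvX_pvR (m : Int) (hm : m ≠ 0) (n : Nat) : pvX m n = pvX m (pvR m n) := by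
  unfold pvR
  split_ifs with h
  · rfl
  · have hmu : pvMu m ≤ n := by
      have := pvMuL m hm; omega
    have hL := pvL_pos m hm
    have hq := Nat.div_add_mod (n - pvMu m) (pvL m)
    have hcomm : pvL m * ((n - pvMu m) / pvL m) = ((n - pvMu m) / pvL m) * pvL m :=
      mul_comm _ _
    have hdec : n = (pvMu m + (n - pvMu m) % pvL m) + ((n - pvMu m) / pvL m) * pvL m := by
      omega
    calc pvX m n
        = pvX m ((pvMu m + (n - pvMu m) % pvL m) + ((n - pvMu m) / pvL m) * pvL m) := by
          rw [← hdec]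
    _ = pvX m (pvMu m + (n - pvMu m) % pvL m) := pvPeriodK m hm _ _ (by omega)

lemma pvKey (m : Int) (hm : m ≠ 0) (a b : Nat) :
    pvX m a = pvX m b ↔ pvR m a = pvR m b := by
  constructor
  · intro h
    apply pvInj m _ _ (pvR_lt m hm a) (pvR_lt m hm b)
    rw [← pvX_pvR m hm a, ← pvX_pvR m hm b]; exact h
  · intro h
    rw [pvX_pvR m hm a, pvX_pvR m hm b, h]

-- phase-1 predicate: x_i = x_{2i}  ↔  mu ≤ i ∧ L ∣ i  (for i ≥ 1)
lemma pvQ_of (m : Int) (hm : m ≠ 0) (i : Nat) (h1 : pvMu m ≤ i) (h2 : pvL m ∣ i) :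
    pvX m i = pvX m (2 * i) := by
  obtain ⟨k, hk⟩ := h2
  have hcomm : pvL m * k = k * pvL m := mul_comm _ _
  have harith : 2 * i = i + k * pvL m := by omega
  rw [harith, pvPeriodK m hm k i h1]

lemma pvQ_to (m : Int) (hm : m ≠ 0) (i : Nat) (hi : 1 ≤ i)
    (h : pvX m i = pvX m (2 * i)) : pvMu m ≤ i ∧ pvL m ∣ i := by
  rw [pvKey m hm] at h
  have hL := pvL_pos m hm
  have hMN := pvMuL m hm
  rcases Nat.lt_or_ge i (pvMu m) with hlt | hge
  · exfalso
    have hiN : i < pvN m := by omega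
    have hri : pvR m i = i := by unfold pvR; rw [if_pos hiN]
    rcases Nat.lt_or_ge (2 * i) (pvN m) with h2 | h2
    · have hr2 : pvR m (2 * i) = 2 * i := by unfold pvR; rw [if_pos h2]
      omega
    · have hr2 : pvR m (2 * i) = pvMu m + (2 * i - pvMu m) % pvL m := by
        unfold pvR; rw [if_neg (by omega)]
      omega
  · refine ⟨hge, ?_⟩
    rw [pvR_of_ge m hm i hge, pvR_of_ge m hm (2 * i) (by omega)] at h
    have hmod : (i - pvMu m) % pvL m = (2 * i - pvMu m) % pvL m := by omega
    have hshape : 2 * i - pvMu m = (i - pvMu m) + i := by omega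
    rw [hshape] at hmod
    have hdvd : pvL m ∣ ((i - pvMu m) + i) - (i - pvMu m) :=
      (Nat.modEq_iff_dvd' (Nat.le_add_right _ _)).mp hmod
    simpa using hdvd

-- nu = the index phase 1 stops at
noncomputable def pvNu (m : Int) : Nat := sInf {i | 1 ≤ i ∧ pvX m i = pvX m (2 * i)}

lemma pvNu_mem_aux (m : Int) (hm : m ≠ 0) :
    1 ≤ pvL m * (pvMu m / pvL m + 1) ∧
    pvX m (pvL m * (pvMu m / pvL m + 1)) = pvX m (2 * (pvL m * (pvMu m / pvL m + 1))) := by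
  have hL := pvL_pos m hm
  have h1 := Nat.div_add_mod (pvMu m) (pvL m)
  have h2 : pvMu m % pvL m < pvL m := Nat.mod_lt _ (by omega)
  have hexp : pvL m * (pvMu m / pvL m + 1) = pvL m * (pvMu m / pvL m) + pvL m := by ring
  refine ⟨by omega, pvQ_of m hm _ (by omega) (dvd_mul_right _ _)⟩

lemma pvNu_spec (m : Int) (hm : m ≠ 0) :
    1 ≤ pvNu m ∧ pvX m (pvNu m) = pvX m (2 * pvNu m) := by
  have h : pvNu m ∈ {i : Nat | 1 ≤ i ∧ pvX m i = pvX m (2 * i)} :=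
    Nat.sInf_mem ⟨_, pvNu_mem_aux m hm⟩
  exact h

lemma pvNu_le (m : Int) (hm : m ≠ 0) (i : Nat)
    (h : 1 ≤ i ∧ pvX m i = pvX m (2 * i)) : pvNu m ≤ i := Nat.sInf_le h

lemma pvNu_props (m : Int) (hm : m ≠ 0) : pvMu m ≤ pvNu m ∧ pvL m ∣ pvNu m := by
  have h := pvNu_spec m hm
  exact pvQ_to m hm _ h.1 h.2

lemma pvNu_le_N (m : Int) (hm : m ≠ 0) : pvNu m ≤ pvN m := by
  have hL := pvL_pos m hm
  have hMN := pvMuL m hm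
  have hle : pvNu m ≤ pvL m * (pvMu m / pvL m + 1) :=
    pvNu_le m hm _ (pvNu_mem_aux m hm)
  have h3 : pvL m * (pvMu m / pvL m) ≤ pvMu m := by
    rw [mul_comm]; exact Nat.div_mul_le_self _ _
  have hexp : pvL m * (pvMu m / pvL m + 1) = pvL m * (pvMu m / pvL m) + pvL m := by ring
  omega

-- ===== loop characterizations =====

lemma pvLoop1_spec (m : Int) (hm : m ≠ 0) :
    ∀ fuel i, 1 ≤ i → i ≤ pvNu m → pvNu m + 1 ≤ fuel + i →
      pvLoop1 m fuel (pvX m i) (pvX m (2 * i)) = pvX m (2 * pvNu m) := by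
  intro fuel
  induction fuel with
  | zero => intro i h1 h2 h3; omega
  | succ f ih =>
    intro i h1 h2 h3
    simp only [pvLoop1]
    split_ifs with heq
    · have : pvNu m ≤ i := pvNu_le m hm i ⟨h1, heq⟩
      have : i = pvNu m := by omega
      rw [this]
    · have hine : i ≠ pvNu m := by
        intro h; rw [h] at heq; exact heq (pvNu_spec m hm).2
      have hx1 : f_mod (pvX m i) m = pvX m (i + 1) := rfl
      have hx2 : f_mod (f_mod (pvX m (2 * i)) m) m = pvX m (2 * (i + 1)) := by
        show f_mod (f_mod (pvX m (2 * i)) m) m = pvX m (2 * i + 1 + 1)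
        rfl
      rw [hx1, hx2]
      exact ih (i + 1) (by omega) (by omega) (by omega)

lemma pvR2_lemma (m : Int) (hm : m ≠ 0) (j : Nat) (hj : j < pvMu m) :
    pvX m j ≠ pvX m (2 * pvNu m + j) := by
  intro hcontra
  rw [pvKey m hm] at hcontra
  have hL := pvL_pos m hm
  have hMN := pvMuL m hm
  have hnu := pvNu_props m hm
  have h1 : pvR m j = j := by unfold pvR; rw [if_pos (by omega)]
  have h2 : pvR m (2 * pvNu m + j) = pvMu m + (2 * pvNu m + j - pvMu m) % pvL m := by
    apply pvR_of_ge m hm; omega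
  omega

lemma pvR2_eq (m : Int) (hm : m ≠ 0) :
    pvX m (pvMu m) = pvX m (2 * pvNu m + pvMu m) := by
  have hnu := pvNu_props m hm
  obtain ⟨k, hk⟩ := hnu.2
  have hcomm : (2 * k) * pvL m = 2 * (pvL m * k) := by ring
  have harith : 2 * pvNu m + pvMu m = pvMu m + (2 * k) * pvL m := by omega
  rw [harith, pvPeriodK m hm _ _ (le_refl _)]

lemma pvLoop2_spec (m : Int) (hm : m ≠ 0) :
    ∀ fuel j, j ≤ pvMu m → pvMu m + 1 ≤ fuel + j →
      pvLoop2 m fuel (pvX m j) (pvX m (2 * pvNu m + j)) (j : Int) =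
        ((pvMu m : Int), pvX m (pvMu m)) := by
  intro fuel
  induction fuel with
  | zero => intro j h1 h2; omega
  | succ f ih =>
    intro j h1 h2
    simp only [pvLoop2]
    split_ifs with heq
    · have hj : j = pvMu m := by
        by_contra hne
        exact pvR2_lemma m hm j (by omega) heq
      rw [hj]
    · have hjlt : j < pvMu m := by
        rcases Nat.lt_or_ge j (pvMu m) with h | h
        · exact h
        · exfalso
          have : j = pvMu m := by omega
          rw [this] at heq
          exact heq (pvR2_eq m hm)
      have hx1 : f_mod (pvX m j) m = pvX m (j + 1) := rfl
      have hx2 : f_mod (pvX m (2 * pvNu m + j)) m = pvX m (2 * pvNu m + (j + 1)) := rfl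
      rw [hx1, hx2]
      have hcast : (j : Int) + 1 = ((j + 1 : Nat) : Int) := by push_cast; ring
      rw [hcast]
      exact ih (j + 1) (by omega) (by omega)

lemma pvL_stop (m : Int) (hm : m ≠ 0) (l : Nat) (h1 : 1 ≤ l) (h2 : l ≤ pvL m) :
    (pvX m (pvMu m) = pvX m (pvMu m + l)) ↔ l = pvL m := by
  have hL := pvL_pos m hm
  have hMN := pvMuL m hm
  constructor
  · intro h
    rw [pvKey m hm] at h
    have hr1 : pvR m (pvMu m) = pvMu m := by
      unfold pvR; rw [if_pos (show pvMu m < pvN m by omega)]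
    have hsimp : pvMu m + l - pvMu m = l := by omega
    have hr2 : pvR m (pvMu m + l) = pvMu m + l % pvL m := by
      rw [pvR_of_ge m hm _ (by omega), hsimp]
    have hz : l % pvL m = 0 := by omega
    rcases Nat.lt_or_ge l (pvL m) with hc | hc
    · rw [Nat.mod_eq_of_lt hc] at hz; omega
    · omega
  · intro h
    rw [h, pvMuL m hm]
    exact (pvMu_mem m hm).2

lemma pvLoop3_spec (m : Int) (hm : m ≠ 0) :
    ∀ fuel l, 1 ≤ l → l ≤ pvL m → pvL m + 1 ≤ fuel + l →
      pvLoop3 m fuel (pvX m (pvMu m)) (pvX m (pvMu m + l)) (l : Int) = (pvL m : Int) := by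
  intro fuel
  induction fuel with
  | zero => intro l h1 h2 h3; omega
  | succ f ih =>
    intro l h1 h2 h3
    simp only [pvLoop3]
    split_ifs with heq
    · have : l = pvL m := (pvL_stop m hm l h1 h2).mp heq
      rw [this]
    · have hlt : l < pvL m := by
        rcases Nat.lt_or_ge l (pvL m) with h | h
        · exact h
        · exfalso
          have : l = pvL m := by omega
          exact heq ((pvL_stop m hm l h1 h2).mpr this)
      have hx : f_mod (pvX m (pvMu m + l)) m = pvX m (pvMu m + (l + 1)) := rfl
      rw [hx]
      have hcast : (l : Int) + 1 = ((l + 1 : Nat) : Int) := by push_cast; ring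
      rw [hcast]
      exact ih (l + 1) (by omega) (by omega) (by omega)

-- A computes (mu, L)
lemma pvA_eq (m : Int) (hm : m ≠ 0) :
    cycle_info_s_mod m = ((pvMu m : Int), (pvL m : Int)) := by
  have hNle := pvN_le m hm
  have hnuN := pvNu_le_N m hm
  have hmuN := pvMu_lt m hm
  have hMN := pvMuL m hm
  have hnu1 := (pvNu_spec m hm).1
  simp only [cycle_info_s_mod]
  have h1 : f_mod 0 m = pvX m 1 := rfl
  have h2 : f_mod (pvX m 1) m = pvX m (2 * 1) := rfl
  rw [h1, h2]
  rw [pvLoop1_spec m hm _ 1 (le_refl _) hnu1 (by omega)]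
  have k2 : pvLoop2 m (m.natAbs + 1) 0 (pvX m (2 * pvNu m)) 0 = ((pvMu m : Int), pvX m (pvMu m)) := by
    have h := pvLoop2_spec m hm (m.natAbs + 1) 0 (by omega) (by omega)
    rw [Nat.add_zero] at h
    have e0 : pvX m 0 = 0 := rfl
    have ec : ((0 : Nat) : Int) = 0 := rfl
    rw [e0, ec] at h
    exact h
  rw [k2]
  have k3 : pvLoop3 m (m.natAbs + 1) (pvX m (pvMu m)) (f_mod (pvX m (pvMu m)) m) 1 = (pvL m : Int) := by
    have h := pvLoop3_spec m hm (m.natAbs + 1) 1 (le_refl _) (pvL_pos m hm) (by omega)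
    have e1 : pvX m (pvMu m + 1) = f_mod (pvX m (pvMu m)) m := rfl
    have ec : ((1 : Nat) : Int) = 1 := by norm_num
    rw [e1, ec] at h
    exact h
  simp [k3]

-- ===== B side =====

-- the dict after indices 0..n have been recorded
def pvDict (m : Int) : Nat → PySem.Dict Int Int
  | 0 => PySem.Dict.insert PySem.Dict.empty 0 0
  | n+1 => PySem.Dict.insert (pvDict m n) (pvX m (n+1)) ((n+1 : Nat) : Int)

lemma pvDict_get_none (m : Int) : ∀ n (z : Int), (∀ i, i ≤ n → pvX m i ≠ z) →
    PySem.Dict.get? (pvDict m n) z = none := by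
  intro n
  induction n with
  | zero =>
    intro z hz
    have h0 : pvX m 0 = 0 := rfl
    have : z ≠ 0 := fun h => hz 0 (le_refl _) (by rw [h0, h])
    simp only [pvDict]
    rw [PySem.Dict.get?_insert_of_ne _ _ this, PySem.Dict.get?_empty]
  | succ k ih =>
    intro z hz
    have : z ≠ pvX m (k+1) := fun h => hz (k+1) (le_refl _) h.symm
    simp only [pvDict]
    rw [PySem.Dict.get?_insert_of_ne _ _ this]
    exact ih z (fun i hi => hz i (by omega))

lemma pvDict_get_mu (m : Int) (hm : m ≠ 0) :
    ∀ n, n < pvN m → pvMu m ≤ n →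
      PySem.Dict.get? (pvDict m n) (pvX m (pvN m)) = some ((pvMu m : Nat) : Int) := by
  intro n
  induction n with
  | zero =>
    intro h0 hmu
    have hmu0 : pvMu m = 0 := by omega
    have hx : pvX m (pvN m) = pvX m 0 := ((pvMu_mem m hm).2).symm.trans (by rw [hmu0])
    have h00 : pvX m 0 = 0 := rfl
    simp only [pvDict]
    rw [hx, h00, PySem.Dict.get?_insert_self]
    rw [hmu0]; rfl
  | succ k ih =>
    intro hlt hmu
    simp only [pvDict]
    rcases Nat.lt_or_ge k (pvMu m) with hk | hk
    · -- mu = k+1: the key just inserted is x mu = x N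
      have hmueq : pvMu m = k + 1 := by omega
      have hx : pvX m (pvN m) = pvX m (k+1) := ((pvMu_mem m hm).2).symm.trans (by rw [hmueq])
      rw [hx, PySem.Dict.get?_insert_self, hmueq]
    · -- mu ≤ k: inserted key x (k+1) ≠ x N, recurse
      have hne : pvX m (pvN m) ≠ pvX m (k+1) := by
        intro h
        have := pvMu_unique m hm (k+1) hlt h.symm
        omega
      rw [PySem.Dict.get?_insert_of_ne _ _ hne]
      exact ih (by omega) hk

lemma pvAltLoop_spec (m : Int) (hm : m ≠ 0) :
    ∀ fuel n, n < pvN m → pvN m ≤ fuel + n →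
      pvAltLoop m fuel (pvX m n) (n : Int) (pvDict m n) =
        ((pvMu m : Int), ((pvN m : Int) - (pvMu m : Int))) := by
  intro fuel
  induction fuel with
  | zero => intro n h1 h2; omega
  | succ f ih =>
    intro n h1 h2
    simp only [pvAltLoop]
    have hx : f_mod (pvX m n) m = pvX m (n + 1) := rfl
    rw [hx]
    rcases Nat.lt_or_ge (n + 1) (pvN m) with hlt | hge
    · -- not yet a repeat: lookup misses
      have hnone : PySem.Dict.get? (pvDict m n) (pvX m (n+1)) = none := by
        apply pvDict_get_none
        intro i hi h
        have := pvInj m i (n+1) (by omega) hlt h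
        omega
      rw [hnone]
      have hcast : (n : Int) + 1 = ((n + 1 : Nat) : Int) := by push_cast; ring
      rw [hcast]
      exact ih (n + 1) hlt (by omega)
    · -- n+1 = N: lookup hits at mu
      have hNeq : n + 1 = pvN m := by omega
      have hmu : pvMu m ≤ n := by have := pvMu_lt m hm; omega
      have hsome : PySem.Dict.get? (pvDict m n) (pvX m (n+1)) = some ((pvMu m : Nat) : Int) := by
        rw [hNeq]
        exact pvDict_get_mu m hm n h1 hmu
      rw [hsome]
      have hcast : (n : Int) + 1 = (pvN m : Int) := by exact_mod_cast hNeq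
      rw [hcast]

-- B computes (mu, N - mu)
lemma pvB_eq (m : Int) (hm : m ≠ 0) :
    cycle_info_s_mod_alt m = ((pvMu m : Int), ((pvN m : Int) - (pvMu m : Int))) := by
  have hNle := pvN_le m hm
  have hNpos : 1 ≤ pvN m := by
    have := pvMu_lt m hm; omega
  simp only [cycle_info_s_mod_alt]
  have h0 : (0 : Int) = pvX m 0 := rfl
  have h0' : (0 : Int) = ((0 : Nat) : Int) := rfl
  have hd : PySem.Dict.insert PySem.Dict.empty 0 0 = pvDict m 0 := rfl
  rw [hd]
  calc pvAltLoop m (m.natAbs + 1) 0 0 (pvDict m 0)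
      = pvAltLoop m (m.natAbs + 1) (pvX m 0) ((0 : Nat) : Int) (pvDict m 0) := rfl
    _ = _ := pvAltLoop_spec m hm _ 0 (by omega) (by omega)

-- ===== VERDICT (by name: the statement is the Claim_ definition above) =====
theorem cycle_info_s_mod_spec : Claim_equal_cycle_info_s_mod := by
  intro m _ hm
  unfold Spec_cycle_info_s_mod
  rw [pvA_eq m hm, pvB_eq m hm]
  have h1 := pvMuL m hm
  have : ((pvL m : Nat) : Int) = (pvN m : Int) - (pvMu m : Int) := by
    rw [← h1]; push_cast; ring
  rw [this]
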